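-- pv_equiv track=rewrite | github.com/jin0507/weapon_detection | main_2.py | compute_horizontal_direction_changes
-- ===== SOURCE A (Python) =====
-- def compute_horizontal_direction_changes(coords):
--     direction_changes = 0
--     prev_dx = None
--
--     for i in range(1, len(coords)):
--         dx = coords[i][0] - coords[i - 1][0]
--
--         # Kiểm tra xem dx có thay đổi dấu so với dx trước đó hay không
--         if prev_dx is not None and dx * prev_dx < 0:
--             direction_changes += 1
--
--         prev_dx = dx
--
--     return direction_changes
-- ===== SOURCE B (Python) =====
-- def compute_horizontal_direction_changes(coords):
--     # Encode each consecutive horizontal step as a sign character, then count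
--     # direction reversals as occurrences of the substrings "+-" and "-+".
--     # A '0' character (no horizontal movement) can take part in neither pattern,
--     # which matches the original's strict product-negative test exactly.
--     s = ''.join('+' if b > a else '-' if b < a else '0'
--                 for (a, _), (b, _) in zip(coords, coords[1:]))
--     return s.count('+-') + s.count('-+')
-- ===== Notes on version B (the rewrite author's own statement) =====
-- stated objective: alternative
-- what changed: Replaced the stateful prev_dx accumulator loop with a string-encoding algorithm: each consecutive horizontal step is encoded as a sign character '+'/'-'/'0', and direction changes are counted as substring occurrences of "+-" and "-+" via str.count.
import Mathlib
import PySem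

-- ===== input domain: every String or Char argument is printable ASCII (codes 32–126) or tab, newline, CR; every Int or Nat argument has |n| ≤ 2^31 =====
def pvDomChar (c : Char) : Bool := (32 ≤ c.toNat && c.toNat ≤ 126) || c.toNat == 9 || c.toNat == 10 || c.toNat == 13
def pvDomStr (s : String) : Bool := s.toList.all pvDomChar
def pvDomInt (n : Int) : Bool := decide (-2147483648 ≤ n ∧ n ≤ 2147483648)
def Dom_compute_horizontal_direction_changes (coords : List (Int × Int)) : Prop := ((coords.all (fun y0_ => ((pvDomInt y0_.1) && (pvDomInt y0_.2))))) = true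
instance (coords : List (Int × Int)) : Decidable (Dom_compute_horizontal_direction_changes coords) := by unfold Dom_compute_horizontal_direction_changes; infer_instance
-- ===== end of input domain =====

-- B replaces A's stateful prev_dx-accumulator loop by a string-encoding algorithm:
-- each consecutive horizontal step becomes a sign character '+'/'-'/'0' and direction
-- changes are counted as substring occurrences of "+-" and "-+" (objective: alternative).


-- ===== PORT A =====
-- literal port of A: one loop over range(1, len(coords)) carrying (direction_changes, prev_dx)
def compute_horizontal_direction_changes (coords : List (Int × Int)) : Int :=
  let st := (PySem.List.pyRange 1 (coords.length : Int) 1).foldl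
    (fun (st : Int × Option Int) i =>
      let dx := (PySem.List.pyGetD coords i (0, 0)).1 - (PySem.List.pyGetD coords (i - 1) (0, 0)).1
      let direction_changes :=
        if (match st.2 with
            | some prev_dx => decide (dx * prev_dx < 0)
            | none => false) then st.1 + 1 else st.1
      (direction_changes, some dx))
    (0, none)
  st.1

-- ===== PORT B =====
-- literal port of B: the ''.join of one sign character per zip(coords, coords[1:]) pair
-- (a Python str is a List Char here), then str.count of "+-" and "-+" via PySem.Chars.count
-- (= PySem.Str.count on the char-list side, exact for str.count).
def compute_horizontal_direction_changes_alt (coords : List (Int × Int)) : Int :=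
  let s : List Char := (coords.zip (coords.drop 1)).map
    (fun p => if p.2.1 > p.1.1 then '+' else if p.2.1 < p.1.1 then '-' else '0')
  (PySem.Chars.count s ['+', '-'] : Int) + (PySem.Chars.count s ['-', '+'] : Int)

-- ===== PRECONDITION & SPEC =====
def Spec_compute_horizontal_direction_changes (coords : List (Int × Int)) (out : Int) : Prop := out = compute_horizontal_direction_changes_alt coords
instance (coords : List (Int × Int)) (out : Int) : Decidable (Spec_compute_horizontal_direction_changes coords out) := by unfold Spec_compute_horizontal_direction_changes; infer_instance

-- ===== CLAIM (what is proved, stated in full; the proofs are below) =====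
def Claim_equal_compute_horizontal_direction_changes : Prop := ∀ (coords : List (Int × Int)), Dom_compute_horizontal_direction_changes coords → Spec_compute_horizontal_direction_changes coords (compute_horizontal_direction_changes coords)

-- ===== LEMMAS AND PROOFS =====

-- number of adjacent pairs of l whose product is negative
def pvF : List Int → Int
  | x :: y :: t => (if x * y < 0 then 1 else 0) + pvF (y :: t)
  | _ => 0

-- number of adjacent occurrences of the pair (a, b) in a char list
def pvCnt2 (a b : Char) : List Char → Nat
  | x :: y :: t => (if x = a ∧ y = b then 1 else 0) + pvCnt2 a b (y :: t)
  | _ => 0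

-- A's loop body, abstracted over the diff value
def pvStepA (st : Int × Option Int) (dx : Int) : Int × Option Int :=
  (if (match st.2 with
       | some prev_dx => decide (dx * prev_dx < 0)
       | none => false) then st.1 + 1 else st.1, some dx)

lemma pvFoldA_some (t : List Int) : ∀ (c p : Int),
    (t.foldl pvStepA (c, some p)).1 = c + pvF (p :: t) := by
  induction t with
  | nil => intro c p; simp [pvF]
  | cons d t ih =>
    intro c p
    simp only [List.foldl_cons, pvStepA, pvF, decide_eq_true_eq]
    rw [ih, mul_comm d p]
    by_cases h : p * d < 0 <;> simp [h] <;> ring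

-- the sign-encoding map of B
def pvSgn (d : Int) : Char := if d > 0 then '+' else if d < 0 then '-' else '0'

lemma pvSgn_plus (d : Int) : pvSgn d = '+' ↔ 0 < d := by
  unfold pvSgn
  split_ifs with h1 h2
  · simpa using h1
  · have hne : ('-' : Char) ≠ '+' := by decide
    simp only [hne, false_iff]
    exact h1
  · have hne : ('0' : Char) ≠ '+' := by decide
    simp only [hne, false_iff]
    exact h1

lemma pvSgn_minus (d : Int) : pvSgn d = '-' ↔ d < 0 := by
  unfold pvSgn
  split_ifs with h1 h2
  · have hne : ('+' : Char) ≠ '-' := by decide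
    simp only [hne, false_iff]
    omega
  · simpa using h2
  · have hne : ('0' : Char) ≠ '-' := by decide
    simp only [hne, false_iff]
    exact h2

lemma pvCnt2_sum (l : List Int) :
    ((pvCnt2 '+' '-' (l.map pvSgn) : Int) + (pvCnt2 '-' '+' (l.map pvSgn) : Int)) = pvF l := by
  induction l with
  | nil => simp [pvCnt2, pvF]
  | cons x t ih =>
    cases t with
    | nil => simp [pvCnt2, pvF]
    | cons y t =>
      simp only [List.map_cons] at ih ⊢
      simp only [pvCnt2, pvF]
      push_cast
      rw [← ih]
      have key : ((if pvSgn x = '+' ∧ pvSgn y = '-' then (1 : Int) else 0)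
          + (if pvSgn x = '-' ∧ pvSgn y = '+' then (1 : Int) else 0))
          = if x * y < 0 then 1 else 0 := by
        simp only [pvSgn_plus, pvSgn_minus]
        rw [if_congr (mul_neg_iff (a := x) (b := y)) rfl rfl]
        split_ifs <;> omega
      rw [← key]
      ring

lemma pvGo_nil (sub : List Char) (fuel acc : Nat) :
    PySem.Chars.count.go sub fuel [] acc = acc := by
  cases fuel <;> rfl

-- CPython's non-overlapping str.count equals the adjacent-pair count for a
-- two-character pattern with distinct characters (such a pattern cannot overlap itself)
lemma pvCnt2_cons_ne (a b x : Char) (t : List Char) (h : x ≠ a) :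
    pvCnt2 a b (x :: t) = pvCnt2 a b t := by
  cases t with
  | nil => simp [pvCnt2]
  | cons y t => simp [pvCnt2, h]

lemma pvGo (a b : Char) (hab : a ≠ b) : ∀ (fuel : Nat) (l : List Char) (acc : Nat),
    l.length ≤ fuel →
    PySem.Chars.count.go [a, b] fuel l acc = acc + pvCnt2 a b l := by
  intro fuel
  induction fuel with
  | zero =>
    intro l acc h
    have : l = [] := List.eq_nil_of_length_eq_zero (Nat.le_zero.mp h)
    subst this
    simp [pvGo_nil, pvCnt2]
  | succ f ih =>
    intro l acc h
    cases l with
    | nil => simp [pvGo_nil, pvCnt2]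
    | cons x t =>
      cases t with
      | nil =>
        have hred : PySem.Chars.count.go [a, b] (f + 1) [x] acc
            = if [a, b].isPrefixOf [x] then PySem.Chars.count.go [a, b] f (List.drop 2 [x]) (acc + 1)
              else PySem.Chars.count.go [a, b] f [] acc := rfl
        have hpre : [a, b].isPrefixOf [x] = false := by simp [List.isPrefixOf]
        rw [hred, hpre]
        simp [pvGo_nil, pvCnt2]
      | cons y t =>
        have hred : PySem.Chars.count.go [a, b] (f + 1) (x :: y :: t) acc
            = if [a, b].isPrefixOf (x :: y :: t) then
                PySem.Chars.count.go [a, b] f t (acc + 1)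
              else PySem.Chars.count.go [a, b] f (y :: t) acc := rfl
        have hcnt : pvCnt2 a b (x :: y :: t)
            = (if x = a ∧ y = b then 1 else 0) + pvCnt2 a b (y :: t) := by
          simp [pvCnt2]
        by_cases hxy : x = a ∧ y = b
        · obtain ⟨hx, hy⟩ := hxy
          have hpre : [a, b].isPrefixOf (x :: y :: t) = true := by
            simp [List.isPrefixOf, hx, hy]
          rw [hred, hpre, if_pos rfl, ih t (acc + 1) (by simp at h ⊢; omega)]
          rw [hcnt, if_pos ⟨hx, hy⟩, pvCnt2_cons_ne a b y t (hy ▸ Ne.symm hab)]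
          omega
        · have hpre : [a, b].isPrefixOf (x :: y :: t) = false := by
            simp only [List.isPrefixOf, Bool.and_eq_false_iff, beq_eq_false_iff_ne, ne_eq]
            by_cases hx : x = a
            · right; left; intro hy; exact hxy ⟨hx, hy.symm⟩
            · left; intro hc; exact hx hc.symm
          rw [hred, hpre]
          simp only [Bool.false_eq_true, if_false]
          rw [ih (y :: t) acc (by simp at h ⊢; omega), hcnt, if_neg hxy]
          omega

lemma pvCount_eq (a b : Char) (hab : a ≠ b) (l : List Char) :
    PySem.Chars.count l [a, b] = pvCnt2 a b l := by
  have h := pvGo a b hab l.length l 0 le_rfl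
  simp only [PySem.Chars.count, List.isEmpty_cons, Bool.false_eq_true, if_false]
  rw [h]
  omega

-- ===== VERDICT (by name: the statement is the Claim_ definition above) =====
theorem compute_horizontal_direction_changes_spec : Claim_equal_compute_horizontal_direction_changes := by
  intro coords _
  unfold Spec_compute_horizontal_direction_changes
  unfold compute_horizontal_direction_changes compute_horizontal_direction_changes_alt
  set diffsZ := (coords.zip (coords.drop 1)).map (fun p : (Int × Int) × Int × Int => p.2.1 - p.1.1)
    with hdiffsZ
  -- B's sign string is diffsZ mapped through pvSgn
  have hs : (coords.zip (coords.drop 1)).map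
      (fun p : (Int × Int) × Int × Int => if p.2.1 > p.1.1 then '+' else if p.2.1 < p.1.1 then '-' else '0')
      = diffsZ.map pvSgn := by
    rw [hdiffsZ, List.map_map]
    refine List.map_congr_left (fun p _ => ?_)
    simp only [Function.comp_apply, pvSgn, gt_iff_lt, sub_pos, sub_neg]
  -- A's index loop is a fold over the same diff list
  have hA : (PySem.List.pyRange 1 (coords.length : Int) 1).foldl
      (fun (st : Int × Option Int) i =>
        let dx := (PySem.List.pyGetD coords i (0, 0)).1 - (PySem.List.pyGetD coords (i - 1) (0, 0)).1
        let direction_changes :=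
          if (match st.2 with
              | some prev_dx => decide (dx * prev_dx < 0)
              | none => false) then st.1 + 1 else st.1
        (direction_changes, some dx)) (0, none)
      = diffsZ.foldl pvStepA (0, none) := by
    have hlist : (PySem.List.pyRange 1 (coords.length : Int) 1).map
        (fun i => (PySem.List.pyGetD coords i (0, 0)).1 - (PySem.List.pyGetD coords (i - 1) (0, 0)).1)
        = diffsZ := by
      apply List.ext_getElem
      · simp only [List.length_map, PySem.List.length_pyRange_one, hdiffsZ, List.length_zip,
          List.length_drop]
        omega
      · intro k h1 h2
        have hk : k < coords.length - 1 := by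
          simp only [List.length_map, PySem.List.length_pyRange_one] at h1
          omega
        have hlen : k < (PySem.List.pyRange 1 (coords.length : Int) 1).length := by
          simpa using h1
        have hrk : (PySem.List.pyRange 1 (coords.length : Int) 1)[k] = 1 + (k : Int) :=
          PySem.List.getElem_pyRange_one 1 (coords.length : Int) k hlen
        simp only [List.getElem_map, hrk, hdiffsZ, List.getElem_zip]
        have e1 : PySem.List.pyGetD coords (1 + (k : Int)) ((0 : Int), (0 : Int))
            = coords[(1 + (k : Int)).toNat] :=
          PySem.List.pyGetD_eq_getElem coords ((0 : Int), (0 : Int)) (by omega)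
            (by omega)
        have e2 : PySem.List.pyGetD coords (1 + (k : Int) - 1) ((0 : Int), (0 : Int))
            = coords[(1 + (k : Int) - 1).toNat] :=
          PySem.List.pyGetD_eq_getElem coords ((0 : Int), (0 : Int)) (by omega)
            (by omega)
        rw [e1, e2]
        have hd : (List.drop 1 coords)[k]'(by simp; omega) = coords[1 + k]'(by omega) :=
          List.getElem_drop
        rw [hd]
        have i1 : (1 + (k : Int)).toNat = 1 + k := by omega
        have i2 : (1 + (k : Int) - 1).toNat = k := by omega
        simp only [i1, i2]
    rw [← hlist, List.foldl_map]
    rfl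
  simp only [hA, hs]
  rw [pvCount_eq '+' '-' (by decide), pvCount_eq '-' '+' (by decide), pvCnt2_sum]
  cases hZ : diffsZ with
  | nil => simp [pvF]
  | cons d t =>
    have h0 : pvStepA (0, none) d = (0, some d) := by simp [pvStepA]
    simp only [List.foldl_cons, h0, pvFoldA_some]
    simp
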